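-- pv_equiv track=rewrite | github.com/wedkarz02/krypto_ug | stegano/stegano.py | hide_message_in_font_tags
-- ===== SOURCE A (Python) =====
-- def hide_message_in_font_tags(content, bits):
--     modified_content = []
--     bit_index = 0
--
--     i = 0
--     while i < len(content):
--         if content[i:i+6].lower() == '<font>':
--             modified_content.append('<font>')
--             if bit_index < len(bits):
--                 if bits[bit_index] == '1':
--                     modified_content.append('</font><font>')
--                 bit_index += 1
--             modified_content.append('</font>')
--             i += 6
--         else:
--             modified_content.append(content[i])
--             i += 1
--
--     if bit_index < len(bits):
--         raise ValueError("Not enough <font> tags to hide the message")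
--
--     return ''.join(modified_content)
-- ===== SOURCE B (Python) =====
-- def hide_message_in_font_tags(content, bits):
--     lowered = content.lower()
--     parts = []
--     pos = 0
--     bit_index = 0
--     while True:
--         idx = lowered.find('<font>', pos)
--         if idx == -1:
--             break
--         parts.append(content[pos:idx])
--         parts.append('<font>')
--         if bit_index < len(bits):
--             if bits[bit_index] == '1':
--                 parts.append('</font><font>')
--             bit_index += 1
--         parts.append('</font>')
--         pos = idx + 6
--     parts.append(content[pos:])
--     if bit_index < len(bits):
--         raise ValueError("Not enough <font> tags to hide the message")
--     return ''.join(parts)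
-- ===== Notes on version B (the rewrite author's own statement) =====
-- stated objective: faster
-- what changed: Replaces the per-character scan (slicing and lowercasing 6 chars at every position, appending one char at a time) with a single lower() pass plus str.find-driven jumps between matches, appending whole slices between tags.
import Mathlib
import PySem

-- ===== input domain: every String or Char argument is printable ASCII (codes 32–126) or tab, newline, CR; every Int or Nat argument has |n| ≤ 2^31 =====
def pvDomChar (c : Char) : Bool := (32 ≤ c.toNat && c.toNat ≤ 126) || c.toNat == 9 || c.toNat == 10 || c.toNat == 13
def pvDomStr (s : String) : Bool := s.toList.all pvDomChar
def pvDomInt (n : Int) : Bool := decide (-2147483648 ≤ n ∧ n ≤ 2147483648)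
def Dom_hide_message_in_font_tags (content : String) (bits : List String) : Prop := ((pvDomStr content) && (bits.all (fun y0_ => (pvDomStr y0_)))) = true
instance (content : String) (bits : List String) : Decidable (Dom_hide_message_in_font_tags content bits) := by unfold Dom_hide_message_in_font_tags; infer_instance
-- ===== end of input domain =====

-- B replaces A's per-character scan with one lower() pass plus find-driven jumps between
-- matches, appending whole slices between tags (a constant-factor speed mechanism;
-- return-value equivalence only — neither program mutates its arguments).

-- ===== PORT A =====
-- while-loop of A: state (i, bit_index, modified_content); content[i:i+6] is
-- (cl.drop i).take 6 (= PySem.List.slice cl i (i+6), per PySem.List.slice_natCast_add)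
def hideA_loop (cl : List Char) (bits : List String) (i bi : Nat) (acc : List (List Char)) : List (List Char) × Nat :=
  if h : i < cl.length then
    if PySem.Chars.lower ((cl.drop i).take 6) = "<font>".toList then
      let acc1 := acc ++ ["<font>".toList]
      let p : List (List Char) × Nat :=
        if bi < bits.length then
          (if bits.getD bi "" = "1" then acc1 ++ ["</font><font>".toList] else acc1, bi + 1)
        else (acc1, bi)
      hideA_loop cl bits (i + 6) p.2 (p.1 ++ ["</font>".toList])
    else
      hideA_loop cl bits (i + 1) bi (acc ++ [[cl[i]]])
  else (acc, bi)
termination_by cl.length - i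
decreasing_by all_goals omega

-- the ValueError path (final bit_index < len(bits)) is excluded by Pre_; the joined parts are returned
def hide_message_in_font_tags (content : String) (bits : List String) : String :=
  String.ofList (PySem.Chars.join [] (hideA_loop content.toList bits 0 0 []).1)

-- ===== PORT B =====
-- lowered.find('<font>', pos) ≠ -1 forces pos ≤ len(lowered) (termination helper, cited by the port)
theorem pvFindFrom_le (s sub : List Char) (k : Nat)
    (h : PySem.Chars.findFrom s sub (k : Int) none ≠ -1) : k ≤ s.length := by
  by_contra hk
  rw [not_le] at hk
  apply h
  simp only [PySem.Chars.findFrom]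
  have : ((s.length : Int)) < (k : Int) := by exact_mod_cast hk
  split <;> omega

-- while-True loop of B: state (pos, bit_index, parts); content[pos:idx] is
-- (cl.drop pos).take (idx - pos); returns the final pos so the caller can append content[pos:]
def hideB_loop (cl low : List Char) (bits : List String) (pos bi : Nat) (acc : List (List Char)) : List (List Char) × Nat × Nat :=
  let idx := PySem.Chars.findFrom low "<font>".toList (pos : Int) none
  if hidx : idx = -1 then (acc, bi, pos)
  else
    let j := idx.toNat
    let acc1 := acc ++ [(cl.drop pos).take (j - pos), "<font>".toList]
    let p : List (List Char) × Nat :=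
      if bi < bits.length then
        (if bits.getD bi "" = "1" then acc1 ++ ["</font><font>".toList] else acc1, bi + 1)
      else (acc1, bi)
    hideB_loop cl low bits (j + 6) p.2 (p.1 ++ ["</font>".toList])
termination_by low.length - pos
decreasing_by
  have hk := pvFindFrom_le low "<font>".toList pos hidx
  obtain ⟨h1, h2, _⟩ := PySem.Chars.findFrom_natCast_spec low "<font>".toList pos hk hidx
  have h6 : ("<font>".toList).length ≤ (low.drop (PySem.Chars.findFrom low "<font>".toList (pos : Int) none).toNat).length := h2.length_le
  simp only [List.length_drop] at h6
  have hsl : ("<font>".toList).length = 6 := by decide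
  omega

def hide_message_in_font_tags_alt (content : String) (bits : List String) : String :=
  let cl := content.toList
  let low := PySem.Chars.lower cl          -- content.lower()
  let r := hideB_loop cl low bits 0 0 []
  -- parts.append(content[pos:]); the ValueError path is excluded by Pre_; ''.join(parts)
  String.ofList (PySem.Chars.join [] (r.1 ++ [cl.drop r.2.2]))

-- ===== PRECONDITION & SPEC =====
-- Pre_ excludes exactly the inputs where A raises ValueError: fewer (case-insensitive,
-- non-overlapping) '<font>' occurrences than bits to hide.
def Pre_hide_message_in_font_tags (content : String) (bits : List String) : Prop :=
  bits.length ≤ PySem.Str.count (PySem.Str.lower content) "<font>"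
instance (content : String) (bits : List String) : Decidable (Pre_hide_message_in_font_tags content bits) := by unfold Pre_hide_message_in_font_tags; infer_instance

def pvWitness_hide_message_in_font_tags : String × List String := ("a<font>b<FONT>c", ["1", "0"])

def Spec_hide_message_in_font_tags (content : String) (bits : List String) (out : String) : Prop := out = hide_message_in_font_tags_alt content bits
instance (content : String) (bits : List String) (out : String) : Decidable (Spec_hide_message_in_font_tags content bits out) := by unfold Spec_hide_message_in_font_tags; infer_instance

-- ===== CLAIM (what is proved, stated in full; the proofs are below) =====
def Claim_equal_hide_message_in_font_tags : Prop := ∀ (content : String) (bits : List String), Dom_hide_message_in_font_tags content bits → Pre_hide_message_in_font_tags content bits → Spec_hide_message_in_font_tags content bits (hide_message_in_font_tags content bits)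

-- ===== LEMMAS AND PROOFS =====

-- ''.join over List Char parts is flatten
theorem joinE_flatten (l : List (List Char)) : PySem.Chars.join [] l = l.flatten := by
  induction l with
  | nil => rfl
  | cons x t ih =>
    cases t with
    | nil => simp [PySem.Chars.join, List.intercalate, List.intersperse]
    | cons y t2 =>
      rw [PySem.Chars.join_cons_cons, ih]
      simp

theorem flatten_singles (cs : List Char) : (cs.map (fun c => [c])).flatten = cs := by
  rw [← joinE_flatten, PySem.Chars.join_nil_singletons]

theorem flatten_singles_drop (cs : List Char) (m : Nat) :
    (List.drop m (cs.map (fun c => [c]))).flatten = cs.drop m := by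
  rw [← List.map_drop, flatten_singles]

theorem flatten_singles_take_drop (cs : List Char) (n m : Nat) :
    (List.take n (List.drop m (cs.map (fun c => [c])))).flatten = List.take n (List.drop m cs) := by
  rw [← List.map_drop, ← List.map_take, flatten_singles]

-- A's match test at position i ↔ '<font>' is a prefix of the lowered tail
theorem match_bridge (cl : List Char) (i : Nat) :
    (PySem.Chars.lower ((cl.drop i).take 6) = "<font>".toList) ↔
      "<font>".toList <+: (PySem.Chars.lower cl).drop i := by
  have h1 : PySem.Chars.lower ((cl.drop i).take 6) = ((PySem.Chars.lower cl).drop i).take 6 := by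
    simp [PySem.Chars.lower, List.map_take, List.map_drop]
  rw [h1, List.prefix_iff_eq_take]
  have h2 : ("<font>".toList).length = 6 := by decide
  rw [h2]
  exact eq_comm

theorem no_match_of_not_infix {low sub : List Char} {pos j : Nat}
    (h : ¬ sub <:+: low.drop pos) (hj : pos ≤ j) : ¬ sub <+: low.drop j := by
  intro hp
  apply h
  have heq : low.drop j = (low.drop pos).drop (j - pos) := by
    rw [List.drop_drop]; congr 1; omega
  rw [heq] at hp
  exact hp.isInfix.trans (List.drop_suffix _ _).isInfix

-- A appends one char per position across a region with no match
theorem A_skip (cl : List Char) (bits : List String) (k : Nat) :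
    ∀ (i bi : Nat) (acc : List (List Char)), i + k ≤ cl.length →
    (∀ j, i ≤ j → j < i + k → ¬ "<font>".toList <+: (PySem.Chars.lower cl).drop j) →
    hideA_loop cl bits i bi acc =
      hideA_loop cl bits (i + k) bi (acc ++ ((cl.drop i).take k).map (fun c => [c])) := by
  induction k with
  | zero => intro i bi acc _ _; simp
  | succ k ih =>
    intro i bi acc hik hno
    have hi : i < cl.length := by omega
    rw [hideA_loop, dif_pos hi]
    have htest : ¬ (PySem.Chars.lower ((cl.drop i).take 6) = "<font>".toList) := by
      rw [match_bridge]; exact hno i le_rfl (by omega)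
    rw [if_neg htest]
    rw [ih (i + 1) bi (acc ++ [[cl[i]]]) (by omega) (fun j h1 h2 => hno j (by omega) (by omega))]
    have hix : i + 1 + k = i + (k + 1) := by omega
    rw [hix]
    have hsplit : (cl.drop i).take (k + 1) = cl[i] :: (cl.drop (i + 1)).take k := by
      rw [List.drop_eq_getElem_cons hi, List.take_succ_cons]
    rw [hsplit]
    simp

-- A runs to the end of content when no further match exists
theorem A_tail (cl : List Char) (bits : List String) (pos bi : Nat) (acc : List (List Char))
    (hpos : pos ≤ cl.length)
    (hni : ¬ "<font>".toList <:+: (PySem.Chars.lower cl).drop pos) :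
    hideA_loop cl bits pos bi acc = (acc ++ (cl.drop pos).map (fun c => [c]), bi) := by
  rw [A_skip cl bits (cl.length - pos) pos bi acc (by omega)
      (fun j h1 _ => no_match_of_not_infix hni h1)]
  have hpl : pos + (cl.length - pos) = cl.length := by omega
  rw [hpl, hideA_loop, dif_neg (by omega)]
  have htk : (cl.drop pos).take (cl.length - pos) = cl.drop pos := by
    apply List.take_of_length_le
    simp
  rw [htk]

theorem end_case (cl : List Char) (bits : List String) (pos bi : Nat)
    (accA accB : List (List Char)) (hpos : pos ≤ cl.length)
    (hacc : accA.flatten = accB.flatten)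
    (hidx : PySem.Chars.findFrom (PySem.Chars.lower cl) "<font>".toList (pos : Int) none = -1) :
    PySem.Chars.join [] (hideA_loop cl bits pos bi accA).1 =
      PySem.Chars.join []
        ((hideB_loop cl (PySem.Chars.lower cl) bits pos bi accB).1 ++
          [cl.drop (hideB_loop cl (PySem.Chars.lower cl) bits pos bi accB).2.2]) := by
  have hlen : (PySem.Chars.lower cl).length = cl.length := by simp [PySem.Chars.lower]
  have hB : hideB_loop cl (PySem.Chars.lower cl) bits pos bi accB = (accB, bi, pos) := by
    rw [hideB_loop]; simp; exact fun h => absurd hidx h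
  rw [hB]
  have hni : ¬ "<font>".toList <:+: (PySem.Chars.lower cl).drop pos :=
    (PySem.Chars.findFrom_natCast_eq_neg_one_iff _ _ pos (by omega)).mp hidx
  rw [A_tail cl bits pos bi accA hpos hni]
  simp [joinE_flatten, flatten_singles_drop, hacc]

-- joint simulation of the two loops (accumulators kept equal up to join)
theorem main_loop_aux (cl : List Char) (bits : List String) :
    ∀ (n pos bi : Nat) (accA accB : List (List Char)),
    cl.length - pos ≤ n → pos ≤ cl.length →
    accA.flatten = accB.flatten →
    PySem.Chars.join [] (hideA_loop cl bits pos bi accA).1 =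
      PySem.Chars.join []
        ((hideB_loop cl (PySem.Chars.lower cl) bits pos bi accB).1 ++
          [cl.drop (hideB_loop cl (PySem.Chars.lower cl) bits pos bi accB).2.2]) := by
  have hlen : (PySem.Chars.lower cl).length = cl.length := by simp [PySem.Chars.lower]
  intro n
  induction n with
  | zero =>
    intro pos bi accA accB hn hpos hacc
    have hpe : pos = cl.length := by omega
    have hidx : PySem.Chars.findFrom (PySem.Chars.lower cl) "<font>".toList (pos : Int) none = -1 := by
      rw [PySem.Chars.findFrom_natCast_eq_neg_one_iff _ _ pos (by omega)]
      intro hinf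
      have h6 := hinf.length_le
      simp only [List.length_drop, hlen, hpe] at h6
      have : ("<font>".toList).length = 6 := by decide
      omega
    exact end_case cl bits pos bi accA accB hpos hacc hidx
  | succ n ih =>
    intro pos bi accA accB hn hpos hacc
    by_cases hidx : PySem.Chars.findFrom (PySem.Chars.lower cl) "<font>".toList (pos : Int) none = -1
    · exact end_case cl bits pos bi accA accB hpos hacc hidx
    · obtain ⟨h1, h2, h3⟩ :=
        PySem.Chars.findFrom_natCast_spec (PySem.Chars.lower cl) "<font>".toList pos (by omega) hidx
      set j := (PySem.Chars.findFrom (PySem.Chars.lower cl) "<font>".toList (pos : Int) none).toNat with hj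
      have hpj : pos ≤ j := by omega
      have hj6 : j + 6 ≤ cl.length := by
        have hle := h2.length_le
        simp only [List.length_drop, hlen] at hle
        have h6 : ("<font>".toList).length = 6 := by decide
        omega
      -- A: skip the unmatched region, then take one matching step
      rw [A_skip cl bits (j - pos) pos bi accA (by omega)
          (fun jj hj1 hj2 => h3 jj hj1 (by omega))]
      have hppj : pos + (j - pos) = j := by omega
      rw [hppj]
      rw [hideA_loop, dif_pos (show j < cl.length by omega)]
      rw [if_pos ((match_bridge cl j).mpr h2)]
      -- B: one step
      have hB : hideB_loop cl (PySem.Chars.lower cl) bits pos bi accB =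
          hideB_loop cl (PySem.Chars.lower cl) bits (j + 6)
            (if bi < bits.length then
               ((if bits.getD bi "" = "1" then
                   (accB ++ [(cl.drop pos).take (j - pos), "<font>".toList]) ++ ["</font><font>".toList]
                 else accB ++ [(cl.drop pos).take (j - pos), "<font>".toList]), bi + 1)
             else (accB ++ [(cl.drop pos).take (j - pos), "<font>".toList], bi)).2
            ((if bi < bits.length then
               ((if bits.getD bi "" = "1" then
                   (accB ++ [(cl.drop pos).take (j - pos), "<font>".toList]) ++ ["</font><font>".toList]
                 else accB ++ [(cl.drop pos).take (j - pos), "<font>".toList]), bi + 1)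
             else (accB ++ [(cl.drop pos).take (j - pos), "<font>".toList], bi)).1 ++ ["</font>".toList]) := by
        rw [hideB_loop]
        simp only [hj]
        rw [dif_neg hidx]
      rw [hB]
      by_cases hbl : bi < bits.length
      · by_cases hb1 : bits.getD bi "" = "1"
        · simp only [if_pos hbl, if_pos hb1]
          exact ih (j + 6) (bi + 1) _ _ (by omega) (by omega)
            (by simp [flatten_singles_take_drop, hacc])
        · simp only [if_pos hbl, if_neg hb1]
          exact ih (j + 6) (bi + 1) _ _ (by omega) (by omega)
            (by simp [flatten_singles_take_drop, hacc])
      · simp only [if_neg hbl]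
        exact ih (j + 6) bi _ _ (by omega) (by omega)
          (by simp [flatten_singles_take_drop, hacc])

-- ===== VERDICT (by name: the statement is the Claim_ definition above) =====
theorem hide_message_in_font_tags_spec : Claim_equal_hide_message_in_font_tags := by
  intro content bits _ _
  unfold Spec_hide_message_in_font_tags hide_message_in_font_tags hide_message_in_font_tags_alt
  exact congrArg String.ofList
    (main_loop_aux content.toList bits content.toList.length 0 0 [] [] (by omega) (by omega) rfl)
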